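-- pv_equiv track=rewrite | github.com/MikeBeller/advent | 2024/09/202409.py | blockit
-- ===== SOURCE A (Python) =====
-- from itertools import groupby
--
-- def blockit(xs):
--     blocks = []
--     i = 0
--     for v,g in groupby(xs):
--         l = len(list(g))
--         blocks.append((i,v,l))
--         i += l
--     return blocks
-- ===== SOURCE B (Python) =====
-- def blockit(xs):
--     if not xs:
--         return []
--     n = len(xs)
--     bounds = [0] + [i for i in range(1, n) if xs[i] != xs[i - 1]] + [n]
--     return [(b, xs[b], bn - b) for b, bn in zip(bounds, bounds[1:])]
-- ===== Notes on version B (the rewrite author's own statement) =====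
-- stated objective: alternative
-- what changed: B first collects all run-boundary indices in one pass (indices where xs[i] != xs[i-1], plus 0 and len(xs)) and then reshapes consecutive boundary pairs into (start, value, length) triples, instead of accumulating a running start index inside a groupby loop.
import Mathlib
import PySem

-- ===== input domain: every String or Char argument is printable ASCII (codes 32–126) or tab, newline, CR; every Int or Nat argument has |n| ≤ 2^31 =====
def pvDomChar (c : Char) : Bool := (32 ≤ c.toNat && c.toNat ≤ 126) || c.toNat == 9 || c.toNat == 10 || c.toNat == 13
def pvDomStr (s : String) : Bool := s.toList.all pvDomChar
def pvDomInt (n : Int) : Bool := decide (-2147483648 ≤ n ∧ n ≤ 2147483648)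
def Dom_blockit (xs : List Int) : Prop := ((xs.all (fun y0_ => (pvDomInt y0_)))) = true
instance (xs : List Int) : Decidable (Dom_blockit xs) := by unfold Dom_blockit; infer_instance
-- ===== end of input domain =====

-- B replaces A's groupby loop (with a running start index) by a two-phase decomposition:
-- collect all run-boundary indices first, then reshape consecutive boundary pairs into triples.
-- Objective: alternative (same O(n) cost, genuinely different structure).

-- ===== PORT A =====
-- A's 'for v,g in groupby(xs)' loop: each iteration consumes one maximal run
-- (v plus the elements of rest equal to v), emits (i, v, l) and advances i by l.
def blockitGo (i : Int) : List Int → List (Int × Int × Int)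
  | [] => []
  | v :: rest =>
    let l : Int := 1 + (rest.takeWhile (· == v)).length
    (i, v, l) :: blockitGo (i + l) (rest.dropWhile (· == v))
termination_by xs => xs.length
decreasing_by
  simp only [List.length_cons]
  exact Nat.lt_succ_of_le (List.length_dropWhile_le _ _)

def blockit (xs : List Int) : List (Int × Int × Int) := blockitGo 0 xs

-- ===== PORT B =====
-- Source B's list [i for i in range(1, n) if xs[i] != xs[i-1]] (indices are provably in range,
-- so xs[i] is exact as getD; indices kept as Nat, cast to Int only in the emitted triples)
def chgPts (xs : List Int) : List Nat :=
  (List.range' 1 (xs.length - 1)).filter (fun i => xs.getD i 0 != xs.getD (i - 1) 0)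

def blockit_alt (xs : List Int) : List (Int × Int × Int) :=
  match xs with
  | [] => []
  | _ :: _ =>
    let bounds : List Nat := 0 :: chgPts xs ++ [xs.length]
    (bounds.zip bounds.tail).map (fun bb => ((bb.1 : Int), xs.getD bb.1 0, (bb.2 : Int) - (bb.1 : Int)))

-- ===== PRECONDITION & SPEC =====
def Spec_blockit (xs : List Int) (out : List (Int × Int × Int)) : Prop := out = blockit_alt xs
instance (xs : List Int) (out : List (Int × Int × Int)) : Decidable (Spec_blockit xs out) := by unfold Spec_blockit; infer_instance

-- ===== CLAIM (what is proved, stated in full; the proofs are below) =====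
def Claim_equal_blockit : Prop := ∀ (xs : List Int), Dom_blockit xs → Spec_blockit xs (blockit xs)

-- ===== LEMMAS AND PROOFS =====

theorem blockitGo_shift (n : ℕ) : ∀ (xs : List Int), xs.length = n → ∀ (i j : Int),
    blockitGo (i + j) xs = (blockitGo j xs).map (fun p => (p.1 + i, p.2.1, p.2.2)) := by
  induction n using Nat.strong_induction_on with
  | _ n ih =>
    intro xs hn i j
    match xs with
    | [] => simp [blockitGo]
    | v :: rest =>
      rw [blockitGo, blockitGo]
      simp only [List.map_cons, List.cons.injEq, Prod.mk.injEq]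
      refine ⟨⟨by ring, trivial⟩, ?_⟩
      rw [add_assoc]
      exact ih (rest.dropWhile (· == v)).length
          (by subst hn; simp only [List.length_cons]
              exact Nat.lt_succ_of_le (List.length_dropWhile_le _ _)) _ rfl i _

-- every index below the run length reads v
theorem run_getD (v : Int) (rest : List Int) (j : ℕ)
    (hj : j < (rest.takeWhile (· == v)).length + 1) : (v :: rest).getD j 0 = v := by
  match j with
  | 0 => rfl
  | k + 1 =>
    have hk : k < (rest.takeWhile (· == v)).length := by omega
    have hrest : rest = rest.takeWhile (· == v) ++ rest.dropWhile (· == v) :=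
      (List.takeWhile_append_dropWhile).symm
    have h1 : (v :: rest).getD (k+1) 0 = rest.getD k 0 := rfl
    rw [h1, hrest, List.getD_append _ _ _ _ hk, List.getD_eq_getElem _ _ hk]
    have := List.mem_takeWhile_imp (List.getElem_mem (l := rest.takeWhile (· == v)) hk)
    simpa using this

-- reading past the first run lands in the dropWhile remainder
theorem shift_getD (v : Int) (rest : List Int) (j : ℕ) :
    (v :: rest).getD ((rest.takeWhile (· == v)).length + 1 + j) 0
      = (rest.dropWhile (· == v)).getD j 0 := by
  have hrest : v :: rest = (v :: rest.takeWhile (· == v)) ++ rest.dropWhile (· == v) := by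
    simp [List.takeWhile_append_dropWhile]
  rw [hrest, List.getD_append_right]
  all_goals simp [Nat.add_comm]

theorem head_getD_ne (v : Int) (rest : List Int) (hd : rest.dropWhile (· == v) ≠ []) :
    (rest.dropWhile (· == v)).getD 0 0 ≠ v := by
  have h := List.head_dropWhile_not (· == v) (l := rest) hd
  rw [List.getD_eq_getElem _ _ (by simpa [List.length_pos_iff] using hd)]
  simpa [List.getElem_zero_eq_head] using h

theorem zip_cons_map_shift (f : ℕ → ℕ) (y : ℕ) (Y : List ℕ) :
    ((0 :: (y :: Y).map f).zip ((y :: Y).map f))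
      = (0, f y) :: ((y :: Y).zip Y).map (Prod.map f f) := by
  simp only [List.map_cons, List.zip_cons_cons]
  rw [show (f y :: List.map f Y) = List.map f (y :: Y) from rfl, List.zip_map]

theorem chgPts_cons (v : Int) (rest : List Int) :
    chgPts (v :: rest) =
      if (rest.dropWhile (· == v)).isEmpty then []
      else ((rest.takeWhile (· == v)).length + 1)
           :: (chgPts (rest.dropWhile (· == v))).map (· + ((rest.takeWhile (· == v)).length + 1)) := by
  set t := rest.takeWhile (· == v) with ht
  set d := rest.dropWhile (· == v) with hd
  have hrl : rest.length = t.length + d.length := by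
    rw [ht, hd, ← List.length_append, List.takeWhile_append_dropWhile]
  have hlen : (v :: rest).length = (t.length + 1) + d.length := by
    simp [hrl]; omega
  have hsplit : List.range' 1 ((v :: rest).length - 1)
      = List.range' 1 t.length ++ List.range' (1 + t.length) d.length := by
    rw [hlen]
    have h := @List.range'_append 1 t.length d.length 1
    simp only [Nat.one_mul] at h
    have e : t.length + 1 + d.length - 1 = t.length + d.length := by omega
    rw [e, ← h]
  have hfilter1 : (List.range' 1 t.length).filter
      (fun i => (v :: rest).getD i 0 != (v :: rest).getD (i - 1) 0) = [] := by
    rw [List.filter_eq_nil_iff]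
    intro i hi
    rw [List.mem_range'] at hi
    rw [run_getD v rest i (by rw [← ht]; omega), run_getD v rest (i-1) (by rw [← ht]; omega)]
    simp
  unfold chgPts
  rw [hsplit, List.filter_append, hfilter1, List.nil_append]
  by_cases hde : d = []
  · simp [hde]
  · have hdl : d.length = (d.length - 1) + 1 := by
      have : d.length ≠ 0 := by simpa [List.length_eq_zero_iff] using hde
      omega
    rw [if_neg (by simp [hde] : ¬ (d.isEmpty = true))]
    rw [hdl, List.range'_succ, List.filter_cons]
    have hP : ((v :: rest).getD (1 + t.length) 0 != (v :: rest).getD (1 + t.length - 1) 0) = true := by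
      have h1 : (v :: rest).getD (1 + t.length) 0 = d.getD 0 0 := by
        have := shift_getD v rest 0
        rw [← ht, ← hd] at this
        simpa [Nat.add_comm] using this
      have h2 : (v :: rest).getD (1 + t.length - 1) 0 = v :=
        run_getD v rest (1 + t.length - 1) (by rw [← ht]; omega)
      rw [h1, h2]
      simpa using head_getD_ne v rest (by rw [← hd]; exact hde)
    rw [if_pos hP]
    congr 1
    · omega
    · -- remaining change points are those of d, shifted by the run length
      simp only [Nat.add_sub_cancel]
      rw [List.range'_eq_map_range, List.filter_map, List.range'_eq_map_range,
        List.filter_map, List.map_map]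
      have hLf : ∀ j ∈ List.range (d.length - 1),
          ((fun i => (v :: rest).getD i 0 != (v :: rest).getD (i - 1) 0)
            ∘ fun x => 1 + t.length + 1 + x) j
          = (fun j => (d.getD (1 + j) 0 != d.getD j 0)) j := by
        intro j _
        simp only [Function.comp_apply]
        have e1 : (v :: rest).getD (1 + t.length + 1 + j) 0 = d.getD (1 + j) 0 := by
          have h := shift_getD v rest (1 + j)
          rw [← ht, ← hd] at h
          rw [← h]; congr 1; omega
        have e2 : (v :: rest).getD (1 + t.length + 1 + j - 1) 0 = d.getD j 0 := by
          have h := shift_getD v rest j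
          rw [← ht, ← hd] at h
          rw [← h]; congr 1; omega
        rw [e1, e2]
      have hRf : ∀ j ∈ List.range (d.length - 1),
          ((fun i => (d.getD i 0 != d.getD (i - 1) 0)) ∘ fun x => 1 + x) j
          = (fun j => (d.getD (1 + j) 0 != d.getD j 0)) j := by
        intro j _
        simp only [Function.comp_apply]
        have e : 1 + j - 1 = j := by omega
        rw [e]
      rw [List.filter_congr hLf, List.filter_congr hRf]
      apply List.map_congr_left
      intro j _
      simp only [Function.comp_apply]
      omega

-- B's boundary/zip assembly satisfies the same head-run recurrence as A's loop
theorem alt_cons (v : Int) (rest : List Int) :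
    blockit_alt (v :: rest) =
      (0, v, (((rest.takeWhile (· == v)).length + 1 : ℕ) : Int))
        :: (blockit_alt (rest.dropWhile (· == v))).map
            (fun p => (p.1 + (((rest.takeWhile (· == v)).length + 1 : ℕ) : Int), p.2.1, p.2.2)) := by
  set t := rest.takeWhile (· == v) with ht
  set d := rest.dropWhile (· == v) with hd
  have hrl : rest.length = t.length + d.length := by
    rw [ht, hd, ← List.length_append, List.takeWhile_append_dropWhile]
  by_cases hde : d = []
  · have hrest : rest.length = t.length := by rw [hrl, hde]; simp
    simp only [blockit_alt, hde, chgPts_cons, ← ht, ← hd]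
    simp [hrest]
  · have hlen2 : (v :: rest).length = (t.length + 1) + d.length := by
      simp [hrl]; omega
    have halt_d : blockit_alt d
        = ((0 :: (chgPts d ++ [d.length])).zip (chgPts d ++ [d.length])).map
            (fun bb => ((bb.1 : Int), d.getD bb.1 0, (bb.2 : Int) - (bb.1 : Int))) := by
      obtain ⟨h0, d', hdc⟩ := List.exists_cons_of_ne_nil hde
      rw [hdc]
      rfl
    have halt_x : blockit_alt (v :: rest)
        = ((0 :: (chgPts (v :: rest) ++ [(v :: rest).length])).zip
              (chgPts (v :: rest) ++ [(v :: rest).length])).map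
            (fun bb => ((bb.1 : Int), (v :: rest).getD bb.1 0, (bb.2 : Int) - (bb.1 : Int))) := rfl
    rw [halt_x, halt_d, chgPts_cons, ← ht, ← hd,
      if_neg (show ¬ (d.isEmpty = true) by simp [hde]), hlen2]
    have hfold : ((t.length + 1) :: (chgPts d).map (· + (t.length + 1))) ++ [t.length + 1 + d.length]
        = (0 :: (chgPts d ++ [d.length])).map (· + (t.length + 1)) := by
      simp [Nat.add_comm]
    simp only [List.cons_append] at hfold ⊢
    rw [hfold, zip_cons_map_shift]
    simp only [List.map_cons, List.map_map]
    refine congrArg₂ List.cons ?_ ?_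
    · simp only [List.getD_cons_zero]
      norm_num
    · apply List.map_congr_left
      intro bb _
      obtain ⟨b, bn⟩ := bb
      simp only [Function.comp_apply, Prod.map_apply, Prod.mk.injEq]
      refine ⟨by push_cast; ring, ?_, by push_cast; ring⟩
      have h := shift_getD v rest b
      rw [← ht, ← hd] at h
      rw [← h]
      congr 1
      omega

theorem alt_eq_go (n : ℕ) : ∀ (xs : List Int), xs.length = n →
    blockit_alt xs = blockitGo 0 xs := by
  induction n using Nat.strong_induction_on with
  | _ n ih =>
    intro xs hn
    match xs with
    | [] => simp [blockit_alt, blockitGo]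
    | v :: rest =>
      rw [alt_cons, blockitGo]
      have ihd := ih (rest.dropWhile (· == v)).length
        (by subst hn; simp only [List.length_cons]
            exact Nat.lt_succ_of_le (List.length_dropWhile_le _ _))
        (rest.dropWhile (· == v)) rfl
      rw [ihd]
      have hsh := blockitGo_shift (rest.dropWhile (· == v)).length
        (rest.dropWhile (· == v)) rfl
        (((rest.takeWhile (· == v)).length + 1 : ℕ) : Int) 0
      rw [← hsh]
      have e : (((rest.takeWhile (· == v)).length + 1 : ℕ) : Int)
          = 1 + ((rest.takeWhile (· == v)).length : Int) := by push_cast; ring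
      rw [e, add_zero, zero_add]

-- ===== VERDICT (by name: the statement is the Claim_ definition above) =====
theorem blockit_spec : Claim_equal_blockit := by
  intro xs _
  unfold Spec_blockit blockit
  exact (alt_eq_go xs.length xs rfl).symm
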